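-- pv_equiv track=rewrite | github.com/kartverket/funksjonsregister-PoC | csv_to_yaml.py | find_child_functions
-- ===== SOURCE A (Python) =====
-- def find_child_functions(current_path, all_functions):
--     """
--     Find direct child functions based on path hierarchy.
--     Used for determining folder structure.
--
--     Example:
--     - Parent: "1.4" -> Children: "1.4.5", "1.4.6", "1.4.7"
--     - Parent: "1.4.5" -> Children: "1.4.5.9"
--     """
--     children = []
--     current_depth = len(current_path.split('.'))
--
--     for func in all_functions:
--         func_path = func['path']
--         # Check if this path starts with current_path and is exactly one level deeper
--         if func_path.startswith(current_path + '.'):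
--             func_depth = len(func_path.split('.'))
--             if func_depth == current_depth + 1:
--                 children.append(func)
--
--     return children
-- ===== SOURCE B (Python) =====
-- def find_child_functions(current_path, all_functions):
--     """Group every function under its immediate parent path in one pass,
--     then return the bucket for current_path."""
--     buckets = {}
--     for func in all_functions:
--         p = func['path']
--         i = p.rfind('.')
--         if i != -1:
--             parent = p[:i]
--             buckets[parent] = buckets.get(parent, []) + [func]
--     return buckets.get(current_path, [])
-- ===== Notes on version B (the rewrite author's own statement) =====
-- stated objective: alternative
-- what changed: Instead of testing each candidate path with startswith plus a split-depth count against current_path, B makes one grouping pass that computes each path's immediate parent via rfind('.')/prefix slice into a parent-to-children dict and returns the single bucket for current_path.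
import Mathlib
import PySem

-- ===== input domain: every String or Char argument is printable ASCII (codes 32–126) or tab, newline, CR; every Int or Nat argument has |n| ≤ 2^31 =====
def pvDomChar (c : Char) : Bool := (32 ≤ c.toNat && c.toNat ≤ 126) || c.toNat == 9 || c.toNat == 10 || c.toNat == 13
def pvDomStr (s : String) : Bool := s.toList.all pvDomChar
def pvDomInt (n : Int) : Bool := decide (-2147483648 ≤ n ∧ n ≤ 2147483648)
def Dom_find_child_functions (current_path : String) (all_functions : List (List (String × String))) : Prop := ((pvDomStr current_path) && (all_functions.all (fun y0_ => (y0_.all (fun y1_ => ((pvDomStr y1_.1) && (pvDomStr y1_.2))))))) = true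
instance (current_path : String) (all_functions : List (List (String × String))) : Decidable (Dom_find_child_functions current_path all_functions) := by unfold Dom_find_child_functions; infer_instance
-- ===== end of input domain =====

-- B replaces A's per-candidate startswith + split-depth test by one grouping pass keyed on each
-- path's immediate parent (rfind('.') / prefix slice) followed by a single bucket lookup (alternative).

-- ===== PORT A =====
-- func['path'] raises KeyError when the key is absent; Pre_ below excludes those inputs (the `none` branch is unreachable there).
def find_child_functions (current_path : String) (all_functions : List (List (String × String))) : List (List (String × String)) :=
  -- sep "." is nonempty so Str.split? is always `some`; `.getD []` merely unwraps it
  let current_depth := ((PySem.Str.split? current_path ".").getD []).length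
  all_functions.foldl (fun children func =>
    match (PySem.Dict.mk func).get? "path" with
    | none => children
    | some func_path =>
      if PySem.Str.startswith func_path (current_path ++ ".") then
        if ((PySem.Str.split? func_path ".").getD []).length = current_depth + 1 then
          children ++ [func]
        else children
      else children) []

-- ===== PORT B =====
-- transliteration of Source B: buckets[parent] = buckets.get(parent, []) + [func] is Dict.modify parent [] (· ++ [func])
def find_child_functions_alt (current_path : String) (all_functions : List (List (String × String))) : List (List (String × String)) :=
  let buckets := all_functions.foldl (fun d func =>
    match (PySem.Dict.mk func).get? "path" with
    | none => d
    | some p =>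
      let i := PySem.Str.rfind p "."
      if i ≠ -1 then
        PySem.Dict.modify d (PySem.Str.slice p none (some i)) [] (fun l => l ++ [func])
      else d) PySem.Dict.empty
  buckets.getD current_path []

-- ===== PRECONDITION & SPEC =====
-- Pre_ excludes exactly the inputs where Python A raises KeyError: some func without a "path" key.
def Pre_find_child_functions (current_path : String) (all_functions : List (List (String × String))) : Prop :=
  ∀ func ∈ all_functions, ((PySem.Dict.mk func).get? "path").isSome = true
instance (current_path : String) (all_functions : List (List (String × String))) : Decidable (Pre_find_child_functions current_path all_functions) := by unfold Pre_find_child_functions; infer_instance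

def pvWitness_find_child_functions : String × (List (List (String × String))) :=
  ("1.4", [[("path", "1.4.5")], [("path", "1.4")], [("path", "2.7.1")], [("path", "1.4.6"), ("name", "x")]])

def Spec_find_child_functions (current_path : String) (all_functions : List (List (String × String))) (out : List (List (String × String))) : Prop := out = find_child_functions_alt current_path all_functions
instance (current_path : String) (all_functions : List (List (String × String))) (out : List (List (String × String))) : Decidable (Spec_find_child_functions current_path all_functions out) := by unfold Spec_find_child_functions; infer_instance

-- ===== CLAIM (what is proved, stated in full; the proofs are below) =====
def Claim_equal_find_child_functions : Prop := ∀ (current_path : String) (all_functions : List (List (String × String))), Dom_find_child_functions current_path all_functions → Pre_find_child_functions current_path all_functions → Spec_find_child_functions current_path all_functions (find_child_functions current_path all_functions)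

-- ===== LEMMAS AND PROOFS =====

-- `s` decomposes as parent `c`, a dot, and a dot-free last segment `b`
def MidDecomp (s c : List Char) : Prop := ∃ b, s = c ++ '.' :: b ∧ '.' ∉ b

theorem singleton_isPrefixOf_iff (c : Char) (t : List Char) :
    ([c].isPrefixOf t = true) ↔ t[0]? = some c := by
  cases t with
  | nil => simp [List.isPrefixOf]
  | cons a t =>
    simp only [List.isPrefixOf, Bool.and_true,
      List.getElem?_cons_zero, Option.some.injEq]
    constructor
    · intro h; have := h.symm; simp at this; exact this.symm
    · intro h; subst h; simp

theorem splitOn_go_length (fuel : Nat) (l cur : List Char) (acc : List (List Char))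
    (h : l.length ≤ fuel) :
    (PySem.Chars.splitOn.go ['.'] fuel l cur acc).length = acc.length + l.count '.' + 1 := by
  induction fuel generalizing l cur acc with
  | zero =>
    have : l = [] := List.length_eq_zero_iff.mp (Nat.le_zero.mp h)
    subst this; simp [PySem.Chars.splitOn.go]
  | succ f ih =>
    cases l with
    | nil => simp [PySem.Chars.splitOn.go]
    | cons a t =>
      rw [PySem.Chars.splitOn.go]
      by_cases hc : a = '.'
      · subst hc
        simp only [List.isPrefixOf, BEq.rfl, Bool.true_and, if_true]
        rw [ih]
        · simp; omega
        · simpa using Nat.le_of_succ_le_succ h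
      · have hp : (['.'].isPrefixOf (a :: t)) = false := by
          rw [Bool.eq_false_iff]
          intro hh
          have := (singleton_isPrefixOf_iff '.' (a :: t)).mp hh
          simp only [List.getElem?_cons_zero, Option.some.injEq] at this
          exact hc this
        rw [hp]
        simp only [Bool.false_eq_true, if_false]
        rw [ih]
        · simp [hc]
        · simpa using Nat.le_of_succ_le_succ h

theorem splitOn_dot_length (s : List Char)
    (hgo : ∀ fuel (l cur : List Char) acc, l.length ≤ fuel →
      (PySem.Chars.splitOn.go ['.'] fuel l cur acc).length = acc.length + l.count '.' + 1) :
    (PySem.Chars.splitOn s ['.']).length = s.count '.' + 1 := by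
  unfold PySem.Chars.splitOn
  rw [hgo _ _ _ _ (by simp)]
  simp

theorem acond_iff_mid (s c : List Char) :
    ((c ++ ['.']) <+: s ∧ s.count '.' = c.count '.' + 1) ↔ MidDecomp s c := by
  constructor
  · rintro ⟨⟨b, rfl⟩, hcount⟩
    refine ⟨b, by simp, ?_⟩
    simp [List.count_append] at hcount
    exact List.count_eq_zero.mp hcount
  · rintro ⟨b, rfl, hb⟩
    refine ⟨⟨b, by simp⟩, ?_⟩
    simp [List.count_append, List.count_eq_zero.mpr hb]

theorem rfind_go_neg (s : List Char) (j : Nat)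
    (hpre : ∀ (c : Char) (t : List Char), ([c].isPrefixOf t = true) ↔ t[0]? = some c)
    (h : ∀ i, i ≤ j → s[i]? ≠ some '.') :
    PySem.Chars.rfind.go s ['.'] j = -1 := by
  induction j with
  | zero =>
    rw [PySem.Chars.rfind.go]
    rw [if_neg]
    intro hh
    exact h 0 (Nat.le_refl 0) ((hpre '.' s).mp hh)
  | succ j ih =>
    rw [PySem.Chars.rfind.go]
    rw [if_neg]
    · exact ih (fun i hi => h i (Nat.le_succ_of_le hi))
    · intro hh
      have := (hpre '.' (s.drop (j+1))).mp hh
      rw [List.getElem?_drop] at this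
      exact h (j+1) (Nat.le_refl _) (by simpa using this)

theorem rfind_go_pos (s : List Char) (j i : Nat) (hij : i ≤ j) (hi : s[i]? = some '.')
    (hpre : ∀ (c : Char) (t : List Char), ([c].isPrefixOf t = true) ↔ t[0]? = some c)
    (hmax : ∀ i', i < i' → i' ≤ j → s[i']? ≠ some '.') :
    PySem.Chars.rfind.go s ['.'] j = (i : Int) := by
  induction j with
  | zero =>
    have : i = 0 := Nat.le_zero.mp hij
    subst this
    rw [PySem.Chars.rfind.go, if_pos ((hpre '.' s).mpr hi)]
    norm_num
  | succ j ih =>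
    rw [PySem.Chars.rfind.go]
    by_cases hc : s[j+1]? = some '.'
    · have : i = j + 1 := by
        rcases Nat.lt_or_ge i (j+1) with h1 | h1
        · exact absurd hc (hmax (j+1) h1 (Nat.le_refl _))
        · omega
      subst this
      rw [if_pos]
      apply (hpre '.' (s.drop (j+1))).mpr
      rw [List.getElem?_drop]; simpa using hi
    · rw [if_neg]
      · apply ih
        · by_cases h1 : i = j + 1
          · exact absurd hi (h1 ▸ hc)
          · omega
        · exact fun i' ha hb => hmax i' ha (Nat.le_succ_of_le hb)
      · intro hh
        have := (hpre '.' (s.drop (j+1))).mp hh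
        rw [List.getElem?_drop] at this
        exact hc (by simpa using this)

theorem rfind_of_mid (s c : List Char)
    (hpre : ∀ (c : Char) (t : List Char), ([c].isPrefixOf t = true) ↔ t[0]? = some c)
    (h : MidDecomp s c) :
    PySem.Chars.rfind s ['.'] = (c.length : Int) := by
  obtain ⟨b, rfl, hb⟩ := h
  unfold PySem.Chars.rfind
  refine rfind_go_pos _ _ _ ?_ ?_ hpre ?_
  · simp
  · rw [List.getElem?_append_right (Nat.le_refl c.length)]
    simp
  · intro i' h1 h2 hc
    rw [List.append_cons, List.getElem?_append_right (by simp; omega)] at hc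
    exact hb (List.mem_of_getElem? hc)

-- the heart: A's test (startswith + split-depth) ≡ B's test (rfind succeeds and the prefix slice equals current_path)
theorem exists_mid_of_mem (s : List Char) (h : '.' ∈ s) : ∃ c, MidDecomp s c := by
  induction s with
  | nil => cases h
  | cons a t ih =>
    by_cases ht : '.' ∈ t
    · obtain ⟨c, b, hb1, hb2⟩ := ih ht
      exact ⟨a :: c, b, by simp [hb1], hb2⟩
    · have ha : a = '.' := by
        rcases List.mem_cons.mp h with h1 | h1
        · exact h1.symm
        · exact absurd h1 ht
      exact ⟨[], t, by simp [ha], ht⟩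

theorem rfind_eq_neg_of_not_mem (s : List Char) (h : '.' ∉ s) :
    PySem.Chars.rfind s ['.'] = -1 := by
  unfold PySem.Chars.rfind
  exact rfind_go_neg s s.length singleton_isPrefixOf_iff
    (fun i _ hc => h (List.mem_of_getElem? hc))

theorem split_len_eq (q : String) :
    ((PySem.Str.split? q ".").getD []).length = q.toList.count '.' + 1 := by
  have : (".").toList = ['.'] := rfl
  simp only [PySem.Str.split?, this, PySem.Chars.split?]
  simp [splitOn_dot_length q.toList splitOn_go_length]

theorem core_cond_iff (cp p : String) :
    (PySem.Str.startswith p (cp ++ ".") = true ∧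
      ((PySem.Str.split? p ".").getD []).length = ((PySem.Str.split? cp ".").getD []).length + 1)
    ↔ (PySem.Str.rfind p "." ≠ -1 ∧
        PySem.Str.slice p none (some (PySem.Str.rfind p ".")) = cp) := by
  have hdot : (".").toList = ['.'] := rfl
  have hA : (PySem.Str.startswith p (cp ++ ".") = true ∧
      ((PySem.Str.split? p ".").getD []).length = ((PySem.Str.split? cp ".").getD []).length + 1)
      ↔ MidDecomp p.toList cp.toList := by
    rw [← acond_iff_mid]
    constructor
    · rintro ⟨h1, h2⟩
      rw [split_len_eq, split_len_eq] at h2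
      refine ⟨?_, by omega⟩
      have := (PySem.Chars.startswith_iff p.toList (cp ++ ".").toList).mp
        (by rw [← PySem.Str.startswith_eq]; exact h1)
      rwa [String.toList_append, hdot] at this
    · rintro ⟨h1, h2⟩
      refine ⟨?_, by rw [split_len_eq, split_len_eq]; omega⟩
      rw [PySem.Str.startswith_eq]
      apply (PySem.Chars.startswith_iff _ _).mpr
      rwa [String.toList_append, hdot]
  rw [hA]
  have hrf : PySem.Str.rfind p "." = PySem.Chars.rfind p.toList ['.'] := by
    rw [PySem.Str.rfind_eq, hdot]
  constructor
  · intro hmid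
    obtain ⟨b, hs, hb⟩ := hmid
    have hr : PySem.Chars.rfind p.toList ['.'] = (cp.toList.length : Int) :=
      rfind_of_mid _ _ singleton_isPrefixOf_iff ⟨b, hs, hb⟩
    refine ⟨by rw [hrf, hr]; omega, ?_⟩
    rw [hrf, hr]
    have : PySem.Chars.slice p.toList none (some (cp.toList.length : Int))
        = cp.toList := by
      rw [PySem.Chars.slice_eq_listSlice, PySem.List.slice_to _ (by omega)]
      rw [Int.toNat_natCast, hs, List.take_left]
    simp only [PySem.Str.slice, this, String.ofList_toList]
  · rintro ⟨h1, h2⟩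
    have hmem : '.' ∈ p.toList := by
      by_contra hmem
      exact h1 (by rw [hrf]; exact rfind_eq_neg_of_not_mem _ hmem)
    obtain ⟨c, b, hs, hb⟩ := exists_mid_of_mem _ hmem
    have hr : PySem.Chars.rfind p.toList ['.'] = (c.length : Int) :=
      rfind_of_mid _ _ singleton_isPrefixOf_iff ⟨b, hs, hb⟩
    have hslice : PySem.Str.slice p none (some (PySem.Str.rfind p ".")) = String.ofList c := by
      rw [hrf, hr]
      simp only [PySem.Str.slice]
      rw [PySem.Chars.slice_eq_listSlice, PySem.List.slice_to _ (by omega),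
        Int.toNat_natCast, hs, List.take_left]
    rw [hslice] at h2
    have : c = cp.toList := by rw [← h2, String.toList_ofList]
    exact ⟨b, by rw [hs, this], hb⟩

theorem loop_invariant (cp : String) (fs : List (List (String × String)))
    (acc : List (List (String × String))) (d : PySem.Dict String (List (List (String × String))))
    (hpre : ∀ f ∈ fs, ((PySem.Dict.mk f).get? "path").isSome = true)
    (hd : d.getD cp [] = acc) :
    fs.foldl (fun children func =>
      match (PySem.Dict.mk func).get? "path" with
      | none => children
      | some func_path =>
        if PySem.Str.startswith func_path (cp ++ ".") then
          if ((PySem.Str.split? func_path ".").getD []).length = ((PySem.Str.split? cp ".").getD []).length + 1 then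
            children ++ [func]
          else children
        else children) acc
    = (fs.foldl (fun d func =>
        match (PySem.Dict.mk func).get? "path" with
        | none => d
        | some p =>
          let i := PySem.Str.rfind p "."
          if i ≠ -1 then
            PySem.Dict.modify d (PySem.Str.slice p none (some i)) [] (fun l => l ++ [func])
          else d) d).getD cp [] := by
  induction fs generalizing acc d with
  | nil => exact hd.symm
  | cons f t ih =>
    have hf : ((PySem.Dict.mk f).get? "path").isSome = true := hpre f List.mem_cons_self
    obtain ⟨p, hp⟩ := Option.isSome_iff_exists.mp hf
    simp only [List.foldl_cons, hp]
    apply ih _ _ (fun g hg => hpre g (List.mem_cons_of_mem f hg))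
    by_cases hB : PySem.Str.rfind p "." = -1
    · rw [if_neg (by simpa using hB), hd]
      split_ifs with h1 h2
      · exact absurd ((core_cond_iff cp p).mp ⟨h1, h2⟩).1 (by simpa using hB)
      · rfl
      · rfl
    · rw [if_pos (by simpa using hB)]
      rw [PySem.Dict.getD_modify]
      by_cases hk : cp = PySem.Str.slice p none (some (PySem.Str.rfind p "."))
      · have hc := (core_cond_iff cp p).mpr ⟨hB, hk.symm⟩
        rw [if_pos hk, ← hk, hd, if_pos hc.1, if_pos hc.2]
      · rw [if_neg hk]
        split_ifs with h1 h2
        · exact absurd ((core_cond_iff cp p).mp ⟨h1, h2⟩).2 (fun hh => hk hh.symm)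
        · exact hd
        · exact hd

-- ===== VERDICT (by name: the statement is the Claim_ definition above) =====
theorem find_child_functions_spec : Claim_equal_find_child_functions := by
  intro cp fs _hdom hpre
  unfold Spec_find_child_functions find_child_functions find_child_functions_alt
  exact loop_invariant cp fs [] PySem.Dict.empty hpre rfl
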